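-- pv_equiv track=rewrite | github.com/NhanT2002/fullPotentialSolverAD | pre/add_wake_face.py | build_edge_to_elems
-- ===== SOURCE A (Python) =====
-- def build_edge_to_elems(elem_conn):
-- 	edge_to_elems = {}
-- 	for elem_id, nodes in enumerate(elem_conn, start=1):
-- 		for i, n1 in enumerate(nodes):
-- 			n2 = nodes[(i + 1) % len(nodes)]
-- 			key = (int(min(n1, n2)), int(max(n1, n2)))
-- 			edge_to_elems.setdefault(key, []).append(elem_id)
-- 	return edge_to_elems
-- ===== SOURCE B (Python) =====
-- def build_edge_to_elems(elem_conn):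
--     records = [((min(n1, n2), max(n1, n2)), eid)
--                for eid, nodes in enumerate(elem_conn, start=1)
--                for n1, n2 in zip(nodes, nodes[1:] + nodes[:1])]
--     keys = dict.fromkeys(k for k, _ in records)
--     return {k: [e for kk, e in records if kk == k] for k in keys}
-- ===== Notes on version B (the rewrite author's own statement) =====
-- stated objective: alternative
-- what changed: Replaces the incremental dict setdefault/append pass with a flat edge-record list built by zipping each node list with its left rotation, then groups it: ordered key dedup (dict.fromkeys) plus one filtering comprehension per distinct edge.
import Mathlib
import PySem

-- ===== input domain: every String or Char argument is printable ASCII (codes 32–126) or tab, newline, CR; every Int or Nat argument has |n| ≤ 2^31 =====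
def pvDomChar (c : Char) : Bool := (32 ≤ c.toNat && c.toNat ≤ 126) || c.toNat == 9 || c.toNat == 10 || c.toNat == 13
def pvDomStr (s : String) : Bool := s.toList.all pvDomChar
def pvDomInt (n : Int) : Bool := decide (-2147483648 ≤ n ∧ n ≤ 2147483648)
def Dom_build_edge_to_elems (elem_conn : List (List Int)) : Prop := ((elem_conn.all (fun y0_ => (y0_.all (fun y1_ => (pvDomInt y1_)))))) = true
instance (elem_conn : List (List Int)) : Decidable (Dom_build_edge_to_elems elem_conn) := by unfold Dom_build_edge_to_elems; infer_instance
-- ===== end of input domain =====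

-- B replaces A's incremental dict(setdefault/append) pass by a flat edge-record list (zip of each
-- node list with its left rotation) that is then grouped via ordered key dedup + a filter per key;
-- same return value, alternative decomposition (not claimed faster).

-- ===== PORT A =====
def build_edge_to_elems (elem_conn : List (List Int)) : List (Int × Int × List Int) :=
  let d :=
    (PySem.List.enumerate elem_conn 1).foldl
      (fun d p =>
        (PySem.List.enumerate p.2 0).foldl
          (fun d q =>
            let n2 := PySem.List.pyGetD p.2 (PySem.Int.mod (q.1 + 1) (p.2.length : Int)) 0
            let key := (min q.2 n2, max q.2 n2)
            d.modify key [] (fun l => l ++ [p.1]))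
          d)
      PySem.Dict.empty
  d.items.map (fun p => (p.1.1, p.1.2, p.2))

-- ===== PORT B =====
-- the flat list of ((min,max) edge key, elem_id) records, one per consecutive node pair
def pvEdgeRecords (elem_conn : List (List Int)) : List ((Int × Int) × Int) :=
  (PySem.List.enumerate elem_conn 1).flatMap
    (fun p =>
      (p.2.zip (PySem.List.slice p.2 (some 1) none ++ PySem.List.slice p.2 none (some 1))).map
        (fun q => ((min q.1 q.2, max q.1 q.2), p.1)))

def build_edge_to_elems_alt (elem_conn : List (List Int)) : List (Int × Int × List Int) :=
  let records := pvEdgeRecords elem_conn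
  (PySem.List.dedup (records.map (·.1))).map
    (fun k => (k.1, k.2, ((records.filter (fun r => r.1 == k)).map (·.2))))

-- ===== PRECONDITION & SPEC =====
def Spec_build_edge_to_elems (elem_conn : List (List Int)) (out : List (Int × Int × List Int)) : Prop := out = build_edge_to_elems_alt elem_conn
instance (elem_conn : List (List Int)) (out : List (Int × Int × List Int)) : Decidable (Spec_build_edge_to_elems elem_conn out) := by unfold Spec_build_edge_to_elems; infer_instance

-- ===== CLAIM (what is proved, stated in full; the proofs are below) =====
def Claim_equal_build_edge_to_elems : Prop := ∀ (elem_conn : List (List Int)), Dom_build_edge_to_elems elem_conn → Spec_build_edge_to_elems elem_conn (build_edge_to_elems elem_conn)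

-- ===== LEMMAS AND PROOFS =====

-- A's index-and-mod successor pairing equals B's zip-with-left-rotation pairing.
lemma pv_enum_pairs (nodes : List Int) :
    ((PySem.List.enumerate nodes 0).map fun q =>
        (q.2, PySem.List.pyGetD nodes (PySem.Int.mod (q.1 + 1) (nodes.length : Int)) 0))
    = nodes.zip (PySem.List.slice nodes (some 1) none ++ PySem.List.slice nodes none (some 1)) := by
  rw [PySem.List.slice_from_one, PySem.List.slice_to (xs := nodes) (b := 1) (by omega)]
  simp only [Int.toNat_one]
  rcases nodes with _ | ⟨x, xs⟩
  · rfl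
  apply List.ext_getElem
  · simp
  intro k h1 h2
  simp only [List.getElem_map, PySem.List.getElem_enumerate]
  have hlen : (x :: xs).length = xs.length + 1 := rfl
  have hmod : PySem.Int.mod ((0:Int) + k + 1) ((x :: xs).length : Int)
      = (((k+1) % (xs.length+1) : Nat) : Int) := by
    rw [hlen]
    push_cast
    rw [show (0:Int) + k + 1 = ((k+1 : Nat) : Int) by push_cast; ring]
    exact_mod_cast PySem.Int.mod_natCast (k+1) (xs.length+1)
  rw [hmod, PySem.List.pyGetD_natCast]
  simp only [List.getElem_zip]
  congr 1
  have hk : k < xs.length + 1 := by simpa using h2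
  rcases Nat.lt_or_ge (k+1) (xs.length+1) with hlt | hge
  · rw [Nat.mod_eq_of_lt hlt]
    rw [List.getD_eq_getElem _ _ (by simpa using hlt)]
    rw [List.getElem_append_left (by simpa using hlt)]
    simp
  · have : k = xs.length := by omega
    subst this
    simp [Nat.mod_self]

-- the grouping step both programs realise, written as a fold over the flat record list
def pvStep (d : PySem.Dict (Int × Int) (List Int)) (r : (Int × Int) × Int) :
    PySem.Dict (Int × Int) (List Int) :=
  d.modify r.1 [] (fun l => l ++ [r.2])

-- A's nested dict-building loop is the record-list fold.
lemma pv_A_fold (elem_conn : List (List Int)) :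
    (PySem.List.enumerate elem_conn 1).foldl
      (fun d p =>
        (PySem.List.enumerate p.2 0).foldl
          (fun d q =>
            let n2 := PySem.List.pyGetD p.2 (PySem.Int.mod (q.1 + 1) (p.2.length : Int)) 0
            let key := (min q.2 n2, max q.2 n2)
            d.modify key [] (fun l => l ++ [p.1]))
          d)
      PySem.Dict.empty
    = (pvEdgeRecords elem_conn).foldl pvStep PySem.Dict.empty := by
  rw [pvEdgeRecords, List.foldl_flatMap]
  apply PySem.List.foldl_congr_mem
  intro d p _
  rw [List.foldl_map, ← pv_enum_pairs p.2, List.foldl_map]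
  rfl

theorem build_edge_to_elems_spec_aux (elem_conn : List (List Int)) :
    build_edge_to_elems elem_conn = build_edge_to_elems_alt elem_conn := by
  rw [build_edge_to_elems, build_edge_to_elems_alt]
  rw [pv_A_fold]
  set records := pvEdgeRecords elem_conn with hrec
  have hstep : (fun (d : PySem.Dict (Int × Int) (List Int)) (r : (Int × Int) × Int) =>
      d.modify r.1 ([] : List Int) ((fun d r (l : List Int) => l ++ [r.2]) d r)) = pvStep := by
    funext d r; rfl
  have hnd : (records.foldl pvStep PySem.Dict.empty).keys.Nodup := by
    rw [← hstep]
    exact PySem.Dict.nodup_keys_foldl_modify_key records (·.1) [] _ _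
      (by simp [PySem.Dict.keys_empty])
  have hkeys : (records.foldl pvStep PySem.Dict.empty).keys
      = PySem.List.dedup (records.map (·.1)) := by
    rw [← hstep, PySem.Dict.keys_foldl_modify_key, PySem.Dict.keys_empty,
      PySem.Set.update_nil_left, PySem.List.dedup_eq_ofList]
  have hget : ∀ k, (records.foldl pvStep PySem.Dict.empty).getD k []
      = (records.filter (fun r => r.1 == k)).map (·.2) := by
    intro k
    rw [← hstep]
    have := PySem.Dict.getD_foldl_modify_append records PySem.Dict.empty k
    simpa [PySem.Dict.getD_empty] using this
  rw [PySem.Dict.items_eq_map_keys _ hnd [], hkeys, List.map_map]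
  apply List.map_congr_left
  intro k _
  simp [hget k]

-- ===== VERDICT (by name: the statement is the Claim_ definition above) =====
theorem build_edge_to_elems_spec : Claim_equal_build_edge_to_elems := by
  intro elem_conn _
  unfold Spec_build_edge_to_elems
  exact build_edge_to_elems_spec_aux elem_conn
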